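-- pv_equiv track=rewrite | github.com/inunezn7/ExpertFinderBot | cogs/aux_functions.py | multi_words_same_msg
-- ===== SOURCE A (Python) =====
-- def multi_words_same_msg(Concepts, dicMsgs):
--     concepts = []
--     # lowerCase concepts:
--     for concept in Concepts:
--         concepts.append(concept.lower())
--
--     experts = {}
--
--     # Intersections between words mentions
--     candidates_byword = dicMsgs[concepts[0]].keys()
--
--     for concept in concepts[1:]:
--         candidates_byword = candidates_byword & dicMsgs[concept].keys()
--
--     candidates = {}
--     for candidate in candidates_byword:
--         msgs_list = set(dicMsgs[concepts[0]][str(candidate)]["msgsID"])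
--
--         for concept in concepts[1:]:
--             new_list = set(dicMsgs[concept][str(candidate)]["msgsID"])
--             msgs_list = msgs_list & new_list
--
--         candidates[candidate] = len(msgs_list)
--
--     return candidates
-- ===== SOURCE B (Python) =====
-- def multi_words_same_msg(Concepts, dicMsgs):
--     concepts = [c.lower() for c in Concepts]
--     tables = [dicMsgs[c] for c in concepts]
--     first, rest = tables[0], tables[1:]
--     n = len(tables)
--     result = {}
--     for cand in first:
--         if all(cand in t for t in rest):
--             ids = set(first[cand]["msgsID"])
--             result[cand] = sum(
--                 1 for mid in ids
--                 if sum(1 for t in tables if mid in t[cand]["msgsID"]) == n)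
--     return result
-- ===== Notes on version B (the rewrite author's own statement) =====
-- stated objective: alternative
-- what changed: Replaces A's key-set intersections and per-candidate shrinking set-intersection loop with a single pass over the first concept's candidates guarded by an all-membership test, counting for each message id in how many concepts it occurs and keeping those whose tally equals the number of concepts (voting instead of intersection).
import Mathlib
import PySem

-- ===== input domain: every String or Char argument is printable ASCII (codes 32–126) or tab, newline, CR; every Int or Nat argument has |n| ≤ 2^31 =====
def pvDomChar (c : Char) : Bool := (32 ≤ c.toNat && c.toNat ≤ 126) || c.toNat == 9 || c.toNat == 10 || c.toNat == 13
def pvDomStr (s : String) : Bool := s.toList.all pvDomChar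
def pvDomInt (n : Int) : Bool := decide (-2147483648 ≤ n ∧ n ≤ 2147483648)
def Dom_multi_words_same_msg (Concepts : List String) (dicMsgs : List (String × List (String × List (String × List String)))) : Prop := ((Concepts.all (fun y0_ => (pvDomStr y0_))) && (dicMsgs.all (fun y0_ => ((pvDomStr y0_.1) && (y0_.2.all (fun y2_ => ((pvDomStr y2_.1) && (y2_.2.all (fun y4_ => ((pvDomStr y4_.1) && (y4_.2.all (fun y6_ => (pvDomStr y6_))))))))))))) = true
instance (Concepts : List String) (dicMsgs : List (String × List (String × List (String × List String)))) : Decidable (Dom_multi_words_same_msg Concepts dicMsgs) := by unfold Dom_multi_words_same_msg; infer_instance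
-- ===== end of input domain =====

-- B replaces A's shrinking set intersections with a single voting pass (count per message id in
-- how many concepts it occurs); same cost, different decomposition ("alternative").

-- ===== PORT A =====
-- Port of A: lowercase the concepts, intersect the concepts' key sets, then for each surviving
-- candidate intersect the per-concept msgsID sets and record the size of the intersection.
def multi_words_same_msg (Concepts : List String) (dicMsgs : List (String × List (String × List (String × List String)))) : List (String × Int) :=
  let concepts := Concepts.foldl (fun acc c => acc ++ [PySem.Str.lower c]) []
  match concepts with
  | [] => []   -- Python raises IndexError on concepts[0] here; excluded by Pre_
  | c0 :: rest =>
    let firstD := PySem.Dict.mk ((PySem.Dict.mk dicMsgs).getD c0 [])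
    let candidates_byword :=
      rest.foldl (fun s c => PySem.Set.inter s (PySem.Dict.mk ((PySem.Dict.mk dicMsgs).getD c [])).keys) firstD.keys
    let candidates := candidates_byword.foldl (fun cands cand =>
      let msgs0 := PySem.Set.ofList ((PySem.Dict.mk (firstD.getD cand [])).getD "msgsID" [])
      let msgs := rest.foldl (fun m c =>
        PySem.Set.inter m (PySem.Set.ofList ((PySem.Dict.mk ((PySem.Dict.mk ((PySem.Dict.mk dicMsgs).getD c [])).getD cand [])).getD "msgsID" []))) msgs0
      cands.insert cand (PySem.Set.len msgs)) PySem.Dict.empty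
    candidates.items

-- ===== PORT B =====
-- Port of B (Source B): one pass over the first concept's candidates; a candidate is kept when every
-- other concept's table contains it, and its value is the number of its first-concept message ids
-- whose occurrence count over all concepts equals the number of concepts.
def multi_words_same_msg_alt (Concepts : List String) (dicMsgs : List (String × List (String × List (String × List String)))) : List (String × Int) :=
  let concepts := Concepts.map PySem.Str.lower
  let tables := concepts.map (fun c => PySem.Dict.mk ((PySem.Dict.mk dicMsgs).getD c []))
  match tables with
  | [] => []   -- Python raises IndexError on tables[0] here; excluded by Pre_
  | first :: rest =>
    let n : Int := tables.length
    let result := first.keys.foldl (fun res cand =>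
      if rest.all (fun t => t.contains cand) then
        let ids := PySem.Set.ofList ((PySem.Dict.mk (first.getD cand [])).getD "msgsID" [])
        res.insert cand (ids.foldl (fun acc mid =>
          if (tables.foldl (fun k t =>
                if ((PySem.Dict.mk (t.getD cand [])).getD "msgsID" []).contains mid then k + 1 else k)
                (0 : Int)) = n
          then acc + 1 else acc) (0 : Int))
      else res) PySem.Dict.empty
    result.items

-- ===== PRECONDITION & SPEC =====
-- the per-concept table reached by a lowered concept name
def pvTbl (dicMsgs : List (String × List (String × List (String × List String)))) (c : String) : PySem.Dict String (List (String × List String)) :=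
  PySem.Dict.mk ((PySem.Dict.mk dicMsgs).getD (PySem.Str.lower c) [])

-- Pre_ excludes exactly the inputs where the Python A raises: empty Concepts (IndexError), a
-- lowered concept missing from dicMsgs (KeyError), or a candidate present in every concept's table
-- whose entry in one of them lacks the "msgsID" key (KeyError).
def Pre_multi_words_same_msg (Concepts : List String) (dicMsgs : List (String × List (String × List (String × List String)))) : Prop :=
  Concepts ≠ [] ∧
  (∀ c ∈ Concepts, (PySem.Dict.mk dicMsgs).contains (PySem.Str.lower c) = true) ∧
  (∀ cand ∈ (pvTbl dicMsgs (Concepts.headD "")).keys,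
    (∀ c ∈ Concepts, (pvTbl dicMsgs c).contains cand = true) →
    ∀ c ∈ Concepts, (PySem.Dict.mk ((pvTbl dicMsgs c).getD cand [])).contains "msgsID" = true)
instance (Concepts : List String) (dicMsgs : List (String × List (String × List (String × List String)))) : Decidable (Pre_multi_words_same_msg Concepts dicMsgs) := by unfold Pre_multi_words_same_msg; infer_instance

def pvWitness_multi_words_same_msg : List String × (List (String × List (String × List (String × List String)))) :=
  (["Ada", "ada"], [("ada", [("u1", [("msgsID", ["m1", "m2", "m1"])]), ("u2", [("msgsID", ["m3"])])])])

def Spec_multi_words_same_msg (Concepts : List String) (dicMsgs : List (String × List (String × List (String × List String)))) (out : List (String × Int)) : Prop := out = multi_words_same_msg_alt Concepts dicMsgs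
instance (Concepts : List String) (dicMsgs : List (String × List (String × List (String × List String)))) (out : List (String × Int)) : Decidable (Spec_multi_words_same_msg Concepts dicMsgs out) := by unfold Spec_multi_words_same_msg; infer_instance

-- ===== CLAIM (what is proved, stated in full; the proofs are below) =====
def Claim_equal_multi_words_same_msg : Prop := ∀ (Concepts : List String) (dicMsgs : List (String × List (String × List (String × List String)))), Dom_multi_words_same_msg Concepts dicMsgs → Pre_multi_words_same_msg Concepts dicMsgs → Spec_multi_words_same_msg Concepts dicMsgs (multi_words_same_msg Concepts dicMsgs)

-- ===== LEMMAS AND PROOFS =====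


-- the msgsID list reached for (already-lowered) concept x and candidate cand — both ports read it
def pvMsgs (dicMsgs : List (String × List (String × List (String × List String)))) (x cand : String) : List String :=
  (PySem.Dict.mk ((PySem.Dict.mk ((PySem.Dict.mk dicMsgs).getD x [])).getD cand [])).getD "msgsID" []

theorem pv_keys_contains {κ ν : Type} [BEq κ] [LawfulBEq κ] (d : PySem.Dict κ ν) (k : κ) :
    d.keys.contains k = d.contains k := by
  rw [Bool.eq_iff_iff, List.contains_iff_mem, ← PySem.Dict.contains_iff_mem_keys]

-- a loop intersecting s with K x for each x of L is one filter over s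
theorem pv_foldl_inter {α β : Type} [BEq α] (K : β → List α) (L : List β) (s : List α) :
    L.foldl (fun m x => PySem.Set.inter m (K x)) s
      = s.filter (fun y => L.all (fun x => (K x).contains y)) := by
  induction L generalizing s with
  | nil => simp
  | cons x L ih =>
    rw [List.foldl_cons, ih]
    simp only [PySem.Set.inter, PySem.Set.contains, List.filter_filter, List.all_cons]
    apply List.filter_congr
    intro y _
    rw [Bool.and_comm]

theorem pv_contains_ofList {α : Type} [BEq α] [LawfulBEq α] (xs : List α) (y : α) :
    List.contains (PySem.Set.ofList xs) y = xs.contains y := by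
  rw [Bool.eq_iff_iff, List.contains_iff_mem, List.contains_iff_mem]
  exact PySem.Set.mem_ofList xs y

-- per-candidate value: |iterated intersection of the per-concept msg-id sets| = B's voting count
theorem pv_val (d : List (String × List (String × List (String × List String)))) (L : List String) (c0 cand : String) :
    PySem.Set.len (L.foldl (fun m x => PySem.Set.inter m (PySem.Set.ofList (pvMsgs d x cand)))
        (PySem.Set.ofList (pvMsgs d c0 cand)))
      = (PySem.Set.ofList (pvMsgs d c0 cand)).foldl (fun acc mid =>
          if ((c0 :: L).foldl (fun k x => if (pvMsgs d x cand).contains mid then k + 1 else k) (0 : Int))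
              = ((L.length : Int) + 1)
          then acc + 1 else acc) (0 : Int) := by
  rw [pv_foldl_inter, PySem.List.foldl_ite_add_one, PySem.Set.len, List.countP_eq_length_filter]
  rw [zero_add, Int.ofNat_inj]
  congr 1
  apply List.filter_congr
  intro mid hmid
  have hmem : mid ∈ pvMsgs d c0 cand := (PySem.Set.mem_ofList _ _).mp hmid
  have hm0 : (pvMsgs d c0 cand).contains mid = true := by
    simpa [List.contains_iff_mem] using hmem
  have hc : ((c0 :: L).foldl (fun k x => if (pvMsgs d x cand).contains mid then k + 1 else k) (0 : Int))
      = ((L.countP (fun x => (pvMsgs d x cand).contains mid) : Int) + 1) := by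
    rw [PySem.List.foldl_if_add_one, List.countP_cons, hm0]
    simp
  rw [Bool.eq_iff_iff, hc]
  simp only [pv_contains_ofList, List.all_eq_true, decide_eq_true_iff]
  constructor
  · intro h
    rw [List.countP_eq_length.mpr h]
  · intro h
    have hle := List.countP_le_length (p := fun x => (pvMsgs d x cand).contains mid) (l := L)
    have hlen : L.countP (fun x => (pvMsgs d x cand).contains mid) = L.length := by omega
    rw [List.countP_eq_length] at hlen
    exact hlen

theorem multi_words_same_msg_spec : Claim_equal_multi_words_same_msg := by
  intro Concepts dicMsgs _ _
  unfold Spec_multi_words_same_msg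
  cases Concepts with
  | nil => simp [multi_words_same_msg, multi_words_same_msg_alt]
  | cons c cs =>
    simp only [multi_words_same_msg, multi_words_same_msg_alt,
      PySem.List.foldl_append_singleton_eq_map, List.nil_append, List.map_cons]
    rw [PySem.List.foldl_if_eq_foldl_filter, pv_foldl_inter]
    have hmap : (PySem.Dict.mk ((PySem.Dict.mk dicMsgs).getD (PySem.Str.lower c) []) ::
        List.map (fun x => PySem.Dict.mk ((PySem.Dict.mk dicMsgs).getD x [])) (List.map PySem.Str.lower cs))
        = List.map (fun x => PySem.Dict.mk ((PySem.Dict.mk dicMsgs).getD x []))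
            (PySem.Str.lower c :: List.map PySem.Str.lower cs) := rfl
    simp only [hmap]
    simp only [List.foldl_map, List.all_map, List.length_map, List.length_cons,
      Nat.cast_add, Nat.cast_one, pv_keys_contains]
    congr 1
    apply PySem.List.foldl_congr_mem
    intro acc cand _
    congr 1
    have hv := pv_val dicMsgs (List.map PySem.Str.lower cs) (PySem.Str.lower c) cand
    simp only [pvMsgs, List.length_map, List.foldl_map] at hv
    exact hv
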